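-- pv_equiv track=rewrite | github.com/log10-io/log10 | examples/feedback/echo/echo.py | _verbal_rating
-- ===== SOURCE A (Python) =====
-- def _verbal_rating(diff: int) -> str:
--     ratings = [
--         (lambda d: d == 0, "perfect"),
--         (lambda d: 0 < d < 3, "good"),
--         (lambda d: 3 <= d < 6, "okay"),
--         (lambda d: 6 <= d < 8, "bad"),
--         (lambda d: d >= 8, "terrible"),
--     ]
--     return next(rating for condition, rating in ratings if condition(abs(diff)))
-- ===== SOURCE B (Python) =====
-- import bisect
--
-- _BOUNDARIES = [1, 3, 6, 8]
-- _LABELS = ["perfect", "good", "okay", "bad", "terrible"]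
--
-- def _verbal_rating(diff: int) -> str:
--     return _LABELS[bisect.bisect_right(_BOUNDARIES, abs(diff))]
-- ===== Notes on version B (the rewrite author's own statement) =====
-- stated objective: idiomatic
-- what changed: Replaces the linear scan over five predicate lambdas with a binary search (bisect_right) into a precomputed threshold table [1,3,6,8] indexing a label list.
import Mathlib
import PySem

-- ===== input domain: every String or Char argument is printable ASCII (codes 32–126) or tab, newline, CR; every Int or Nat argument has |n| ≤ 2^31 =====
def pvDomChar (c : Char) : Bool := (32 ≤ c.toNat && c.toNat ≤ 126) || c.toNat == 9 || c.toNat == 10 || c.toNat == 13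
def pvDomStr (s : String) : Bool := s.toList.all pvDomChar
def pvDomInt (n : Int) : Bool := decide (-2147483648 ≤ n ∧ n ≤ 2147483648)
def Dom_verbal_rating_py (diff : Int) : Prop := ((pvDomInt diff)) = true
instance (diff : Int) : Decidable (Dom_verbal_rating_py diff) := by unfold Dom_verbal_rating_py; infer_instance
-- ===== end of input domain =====

-- B replaces A's linear scan over five predicate lambdas with bisect_right into a
-- precomputed threshold table indexing a label list (idiomatic; same behaviour, similar cost).

-- ===== PORT A =====
-- Literal port of A: the list of (predicate, label) pairs, and `next` = first match.
-- Python's `next` on an exhausted generator raises StopIteration; the predicates cover all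
-- of |diff| ≥ 0, so the `none` branch (defaulted to "") is unreachable.
def verbal_rating_py (diff : Int) : String :=
  let ratings : List ((Int → Bool) × String) :=
    [ (fun d => d == 0, "perfect")
    , (fun d => decide (0 < d ∧ d < 3), "good")
    , (fun d => decide (3 ≤ d ∧ d < 6), "okay")
    , (fun d => decide (6 ≤ d ∧ d < 8), "bad")
    , (fun d => decide (d ≥ 8), "terrible") ]
  ((ratings.find? (fun cr => cr.1 |diff|)).map (fun cr => cr.2)).getD ""

-- ===== PORT B =====
-- Port of B: labels[bisect.bisect_right(boundaries, abs(diff))]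
def verbal_rating_py_alt (diff : Int) : String :=
  let boundaries : List Int := [1, 3, 6, 8]
  let labels : List String := ["perfect", "good", "okay", "bad", "terrible"]
  labels.getD (PySem.List.bisectRight boundaries |diff|) ""

-- ===== PRECONDITION & SPEC =====
def Spec_verbal_rating_py (diff : Int) (out : String) : Prop := out = verbal_rating_py_alt diff
instance (diff : Int) (out : String) : Decidable (Spec_verbal_rating_py diff out) := by unfold Spec_verbal_rating_py; infer_instance

-- ===== CLAIM (what is proved, stated in full; the proofs are below) =====
def Claim_equal_verbal_rating_py : Prop := ∀ (diff : Int), Dom_verbal_rating_py diff → Spec_verbal_rating_py diff (verbal_rating_py diff)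

-- ===== LEMMAS AND PROOFS =====

lemma bisect_cases (d : Int) :
    PySem.List.bisectRight [1,3,6,8] d =
      if d < 1 then 0 else if d < 3 then 1 else if d < 6 then 2 else if d < 8 then 3 else 4 := by
  obtain ⟨hle, hlt, hgt⟩ := PySem.List.bisectRight_spec [1,3,6,8] d (by norm_num)
  set k := PySem.List.bisectRight [1,3,6,8] d with hk
  have L : ∀ j : Fin 4, j.1 < k → ([1,3,6,8] : List Int)[j.1] ≤ d := fun j h => hlt j.1 (by simp) h
  have G : ∀ j : Fin 4, k ≤ j.1 → d < ([1,3,6,8] : List Int)[j.1] := fun j h => hgt j.1 (by simp) h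
  have L0 := L 0; have L1 := L 1; have L2 := L 2; have L3 := L 3
  have G0 := G 0; have G1 := G 1; have G2 := G 2; have G3 := G 3
  simp at L0 L1 L2 L3 G0 G1 G2 G3
  simp at hle
  split_ifs with h1 h3 h6 h8
  · by_contra hne; exact absurd (L0 (by omega)) (by omega)
  · have hka : 0 < k := by by_contra h; exact absurd (G0 (by omega)) (by omega)
    have hkb : k < 2 := by by_contra h; exact absurd (L1 (by omega)) (by omega)
    omega
  · have hka : 1 < k := by by_contra h; exact absurd (G1 (by omega)) (by omega)
    have hkb : k < 3 := by by_contra h; exact absurd (L2 (by omega)) (by omega)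
    omega
  · have hka : 2 < k := by by_contra h; exact absurd (G2 (by omega)) (by omega)
    have hkb : k < 4 := by by_contra h; exact absurd (L3 (by omega)) (by omega)
    omega
  · have hka : 3 < k := by by_contra h; exact absurd (G3 (by omega)) (by omega)
    omega

lemma A_cases (diff : Int) :
    verbal_rating_py diff =
      if |diff| < 1 then "perfect" else if |diff| < 3 then "good"
      else if |diff| < 6 then "okay" else if |diff| < 8 then "bad" else "terrible" := by
  have h0 := abs_nonneg diff
  unfold verbal_rating_py
  generalize |diff| = d at h0 ⊢
  dsimp only
  split_ifs with h1 h3 h6 h8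
  · rw [List.find?_cons_of_pos (h := by simp; omega)]; rfl
  · rw [List.find?_cons_of_neg (h := by simp; omega),
        List.find?_cons_of_pos (h := by simp; omega)]; rfl
  · rw [List.find?_cons_of_neg (h := by simp; omega),
        List.find?_cons_of_neg (h := by simp; omega),
        List.find?_cons_of_pos (h := by simp; omega)]; rfl
  · rw [List.find?_cons_of_neg (h := by simp; omega),
        List.find?_cons_of_neg (h := by simp; omega),
        List.find?_cons_of_neg (h := by simp; omega),
        List.find?_cons_of_pos (h := by simp; omega)]; rfl
  · rw [List.find?_cons_of_neg (h := by simp; omega),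
        List.find?_cons_of_neg (h := by simp; omega),
        List.find?_cons_of_neg (h := by simp; omega),
        List.find?_cons_of_neg (h := by simp; omega),
        List.find?_cons_of_pos (h := by simp; omega)]; rfl


-- ===== VERDICT (by name: the statement is the Claim_ definition above) =====
theorem verbal_rating_py_spec : Claim_equal_verbal_rating_py := by
  intro diff _
  unfold Spec_verbal_rating_py verbal_rating_py_alt
  rw [A_cases]
  dsimp only
  rw [bisect_cases |diff|]
  split_ifs <;> rfl
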